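-- pv_equiv track=rewrite | github.com/AntonieVDB/skorecard | skorecard/pipeline/bucketing_process.py | _find_remapped_specials
-- ===== SOURCE A (Python) =====
-- from typing import Dict, TypeVar
--
-- def _find_remapped_specials(bucket_labels: Dict, var_specials: Dict) -> Dict:
--     """
--     Remaps the specials after the prebucketing process.
--
--     Basically, every bucketer in the bucketing pipeline will now need to
--     use the prebucketing bucket as a different special value,
--     because prebucketing put the specials into a bucket.
--
--     Args:
--         bucket_labels (dict): The label for each unique bucket of a variable
--         var_specials (dict): The specials for a variable, if any.
--     """
--     if bucket_labels is None or var_specials is None: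
--         return {}
--
--     new_specials = {}
--     for label in var_specials.keys():
--         for bucket, bucket_label in bucket_labels.items():
--             if bucket_label == f"Special: {label}":
--                 new_specials[label] = [bucket]
--
--     return new_specials
-- ===== SOURCE B (Python) =====
-- def _find_remapped_specials(bucket_labels, var_specials):
--     if bucket_labels is None or var_specials is None:
--         return {}
--     # Index the wanted "Special: <label>" strings back to their label, once.
--     wanted = {"Special: " + str(label): label for label in var_specials}
--     # One pass over bucket_labels: record the bucket for each wanted label (last wins).
--     hits = {}
--     for bucket, bucket_label in bucket_labels.items():
--         if bucket_label in wanted: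
--             hits[wanted[bucket_label]] = [bucket]
--     # Emit in var_specials key order, as the remap dict is keyed by the specials.
--     return {label: hits[label] for label in var_specials if label in hits}
-- ===== Notes on version B (the rewrite author's own statement) =====
-- stated objective: faster
-- what changed: B inverts the iteration: it builds a reverse index from each wanted 'Special: <label>' string to its label once, makes a single pass over bucket_labels recording the bucket hit per label (last wins), and emits the hits in specials order, replacing A's inner scan of bucket_labels for every special label.
import Mathlib
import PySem

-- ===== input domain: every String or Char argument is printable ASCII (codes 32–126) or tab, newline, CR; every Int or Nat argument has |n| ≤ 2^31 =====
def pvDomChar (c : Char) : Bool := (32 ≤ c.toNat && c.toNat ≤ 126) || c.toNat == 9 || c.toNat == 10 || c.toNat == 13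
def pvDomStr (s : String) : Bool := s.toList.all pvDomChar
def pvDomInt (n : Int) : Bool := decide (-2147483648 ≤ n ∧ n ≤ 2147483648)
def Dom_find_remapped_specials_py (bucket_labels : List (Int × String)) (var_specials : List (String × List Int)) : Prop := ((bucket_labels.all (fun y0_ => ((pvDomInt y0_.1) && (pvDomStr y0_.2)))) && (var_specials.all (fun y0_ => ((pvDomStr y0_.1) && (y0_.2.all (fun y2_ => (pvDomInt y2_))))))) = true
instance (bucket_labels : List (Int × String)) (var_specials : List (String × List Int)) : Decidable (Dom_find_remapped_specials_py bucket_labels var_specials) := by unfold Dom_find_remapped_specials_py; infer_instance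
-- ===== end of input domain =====

-- B inverts the iteration: it indexes the wanted "Special: <label>" strings once, scans
-- bucket_labels a single time recording hits, and emits the result in specials order —
-- replacing A's inner scan of bucket_labels per label. The Python-level `is None` early
-- return has no counterpart under the list types and is not ported.

-- ===== PORT A =====
def find_remapped_specials_py (bucket_labels : List (Int × String)) (var_specials : List (String × List Int)) : List (String × List Int) :=
  let blD : PySem.Dict Int String := PySem.Dict.ofList bucket_labels
  let vsD : PySem.Dict String (List Int) := PySem.Dict.ofList var_specials
  -- for label in var_specials.keys(): for bucket, bucket_label in bucket_labels.items(): …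
  let new_specials : PySem.Dict String (List Int) :=
    vsD.keys.foldl (fun ns label =>
      blD.items.foldl (fun ns p =>
        if p.2 == ("Special: " ++ label) then ns.insert label [p.1] else ns) ns)
      PySem.Dict.empty
  new_specials.items

-- ===== PORT B =====
def find_remapped_specials_py_alt (bucket_labels : List (Int × String)) (var_specials : List (String × List Int)) : List (String × List Int) :=
  let blD : PySem.Dict Int String := PySem.Dict.ofList bucket_labels
  let vsD : PySem.Dict String (List Int) := PySem.Dict.ofList var_specials
  -- wanted = {"Special: " + str(label): label for label in var_specials}
  let wanted : PySem.Dict String String :=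
    vsD.keys.foldl (fun w label => w.insert ("Special: " ++ label) label) PySem.Dict.empty
  -- for bucket, bucket_label in bucket_labels.items(): if bucket_label in wanted: hits[wanted[bucket_label]] = [bucket]
  let hits : PySem.Dict String (List Int) :=
    blD.items.foldl (fun h p =>
      match wanted.get? p.2 with
      | some lab => h.insert lab [p.1]
      | none => h) PySem.Dict.empty
  -- {label: hits[label] for label in var_specials if label in hits}
  (vsD.keys.foldl (fun out label =>
      match hits.get? label with
      | some v => out.insert label v
      | none => out) PySem.Dict.empty).items

-- ===== PRECONDITION & SPEC =====
def Spec_find_remapped_specials_py (bucket_labels : List (Int × String)) (var_specials : List (String × List Int)) (out : List (String × List Int)) : Prop := out = find_remapped_specials_py_alt bucket_labels var_specials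
instance (bucket_labels : List (Int × String)) (var_specials : List (String × List Int)) (out : List (String × List Int)) : Decidable (Spec_find_remapped_specials_py bucket_labels var_specials out) := by unfold Spec_find_remapped_specials_py; infer_instance

-- ===== CLAIM (what is proved, stated in full; the proofs are below) =====
def Claim_equal_find_remapped_specials_py : Prop := ∀ (bucket_labels : List (Int × String)) (var_specials : List (String × List Int)), Dom_find_remapped_specials_py bucket_labels var_specials → Spec_find_remapped_specials_py bucket_labels var_specials (find_remapped_specials_py bucket_labels var_specials)

-- ===== LEMMAS AND PROOFS =====

-- "Special: " ++ · is injective.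
lemma special_inj (a b : String) (h : ("Special: " ++ a) = ("Special: " ++ b)) : a = b := by
  have h2 : ("Special: " ++ a).toList = ("Special: " ++ b).toList := by rw [h]
  simp only [String.toList_append] at h2
  have := List.append_cancel_left h2
  exact String.toList_injective this

-- wanted's lookups only ever return the label whose tag was looked up.
lemma wanted_sound (labels : List String) (d : PySem.Dict String String)
    (hd : ∀ x lab, d.get? x = some lab → x = ("Special: " ++ lab)) :
    ∀ x lab, (labels.foldl (fun w label => w.insert ("Special: " ++ label) label) d).get? x = some lab →
      x = ("Special: " ++ lab) := by
  induction labels generalizing d with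
  | nil => exact hd
  | cons a rest ih =>
    simp only [List.foldl_cons]
    refine ih _ (fun x lab hx => ?_)
    by_cases he : x = ("Special: " ++ a)
    · subst he
      rw [PySem.Dict.get?_insert_self] at hx
      cases hx; rfl
    · rw [PySem.Dict.get?_insert_of_ne _ _ he] at hx
      exact hd _ _ hx

-- a fold of inserts at keys all distinct from k leaves get? k unchanged.
lemma wanted_skip (labels : List String) (d : PySem.Dict String String) (k : String)
    (hk : ∀ l ∈ labels, ("Special: " ++ l) ≠ k) :
    (labels.foldl (fun w label => w.insert ("Special: " ++ label) label) d).get? k = d.get? k := by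
  induction labels generalizing d with
  | nil => rfl
  | cons a rest ih =>
    simp only [List.foldl_cons]
    rw [ih _ (fun l hl => hk l (List.mem_cons_of_mem _ hl)),
        PySem.Dict.get?_insert_of_ne _ _ (fun e => hk a List.mem_cons_self e.symm)]

-- every present label's tag is found by wanted.
lemma wanted_complete (labels : List String) (d : PySem.Dict String String)
    (lab : String) (hlab : lab ∈ labels) :
    (labels.foldl (fun w label => w.insert ("Special: " ++ label) label) d).get? ("Special: " ++ lab) = some lab := by
  induction labels generalizing d with
  | nil => cases hlab
  | cons a rest ih =>
    simp only [List.foldl_cons]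
    by_cases hr : lab ∈ rest
    · exact ih _ hr
    · have : lab = a := by rcases List.mem_cons.mp hlab with h | h; exact h; exact absurd h hr
      subst this
      rw [wanted_skip _ _ _ (fun l hl e => hr ((special_inj l lab e) ▸ hl)),
          PySem.Dict.get?_insert_self]

-- A's inner scan over bucket_labels.items: the net effect is one insert at the LAST matching item.
lemma innerA (l : List (Int × String)) (ns : PySem.Dict String (List Int)) (label : String) :
    l.foldl (fun ns p => if p.2 == ("Special: " ++ label) then ns.insert label [p.1] else ns) ns
    = match l.reverse.find? (fun p => p.2 == ("Special: " ++ label)) with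
      | some p => ns.insert label [p.1]
      | none => ns := by
  induction l generalizing ns with
  | nil => rfl
  | cons p rest ih =>
    simp only [List.foldl_cons, ih, List.reverse_cons, List.find?_append]
    rcases h : rest.reverse.find? (fun q => q.2 == ("Special: " ++ label)) with _ | q
    · by_cases hp : p.2 == ("Special: " ++ label)
      · simp [h, hp]
      · simp [h, hp]
    · by_cases hp : p.2 == ("Special: " ++ label)
      · simp [h, hp, PySem.Dict.insert_insert_self]
      · simp [h, hp]

-- B's hits pass: get? label sees the LAST item of bucket_labels tagged "Special: <label>",
-- provided label is among the specials (so wanted answers for its tag).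
lemma hitsGet (bl : List (Int × String)) (wanted : PySem.Dict String String)
    (d : PySem.Dict String (List Int)) (label : String)
    (hW : ∀ x lab, wanted.get? x = some lab → x = ("Special: " ++ lab))
    (hC : wanted.get? ("Special: " ++ label) = some label) :
    (bl.foldl (fun h p => match wanted.get? p.2 with
        | some lab => h.insert lab [p.1]
        | none => h) d).get? label
    = match bl.reverse.find? (fun p => p.2 == ("Special: " ++ label)) with
      | some p => some [p.1]
      | none => d.get? label := by
  induction bl generalizing d with
  | nil => rfl
  | cons p rest ih =>
    simp only [List.foldl_cons, List.reverse_cons, List.find?_append]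
    rcases h : rest.reverse.find? (fun q => q.2 == ("Special: " ++ label)) with _ | q
    · rw [ih, h]
      rcases hw : wanted.get? p.2 with _ | lab
      · have hne : (p.2 == ("Special: " ++ label)) = false := by
          simp only [beq_eq_false_iff_ne, ne_eq]
          intro e; rw [e, hC] at hw; cases hw
        simp [hne]
      · have hp2 : p.2 = ("Special: " ++ lab) := hW _ _ hw
        by_cases hl : lab = label
        · subst hl
          simp [hp2, PySem.Dict.get?_insert_self]
        · have hne : (p.2 == ("Special: " ++ label)) = false := by
            simp only [beq_eq_false_iff_ne, ne_eq, hp2]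
            intro e; exact hl (special_inj _ _ e)
          simp [hne, PySem.Dict.get?_insert_of_ne _ _ (Ne.symm (fun e => hl e))]
    · rw [ih, h]
      simp

-- a loop over distinct fresh keys inserting optional values appends, i.e. is a filterMap.
lemma outerFold (labels : List String) (f : String → Option (List Int)) (d : PySem.Dict String (List Int))
    (hnd : labels.Nodup) (hfresh : ∀ x ∈ labels, d.contains x = false) :
    (labels.foldl (fun ns label => match f label with | some v => ns.insert label v | none => ns) d).items
    = d.items ++ labels.filterMap (fun label => (f label).map (fun v => (label, v))) := by
  induction labels generalizing d with
  | nil => simp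
  | cons a rest ih =>
    rcases List.nodup_cons.mp hnd with ⟨ha, hrest⟩
    simp only [List.foldl_cons, List.filterMap_cons]
    rcases hf : f a with _ | v
    · simp only [Option.map_none]
      rw [ih _ hrest (fun x hx => hfresh x (List.mem_cons_of_mem _ hx))]
    · simp only [Option.map_some]
      rw [ih _ hrest]
      · rw [PySem.Dict.items_insert_of_not_contains _ _ (hfresh a List.mem_cons_self)]
        simp
      · intro x hx
        rw [PySem.Dict.contains_insert]
        have : x ≠ a := fun e => ha (e ▸ hx)
        simp [this, hfresh x (List.mem_cons_of_mem _ hx)]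

-- A's outer loop step, rephrased through innerA into the optional-insert shape of outerFold.
lemma stepA (bl : List (Int × String)) (ns : PySem.Dict String (List Int)) (label : String) :
    bl.foldl (fun ns p => if p.2 == ("Special: " ++ label) then ns.insert label [p.1] else ns) ns
    = match (bl.reverse.find? (fun p => p.2 == ("Special: " ++ label))).map (fun p => [p.1]) with
      | some v => ns.insert label v
      | none => ns := by
  rw [innerA]
  rcases h : bl.reverse.find? (fun p => p.2 == ("Special: " ++ label)) with _ | p <;> simp [h]

-- ===== VERDICT (by name: the statement is the Claim_ definition above) =====
theorem find_remapped_specials_py_spec : Claim_equal_find_remapped_specials_py := by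
  intro bl vs _
  unfold Spec_find_remapped_specials_py find_remapped_specials_py find_remapped_specials_py_alt
  simp only [stepA]
  have hnd := PySem.Dict.nodup_keys_ofList (ps := vs)
  rw [outerFold _ (fun label => ((PySem.Dict.ofList bl).items.reverse.find? (fun p => p.2 == ("Special: " ++ label))).map (fun p => [p.1]))
        _ hnd (fun x _ => PySem.Dict.contains_empty _),
      outerFold _ (fun label => ((PySem.Dict.ofList bl).items.foldl (fun h p =>
          match ((PySem.Dict.ofList vs).keys.foldl (fun w label => w.insert ("Special: " ++ label) label) PySem.Dict.empty).get? p.2 with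
          | some lab => h.insert lab [p.1]
          | none => h) PySem.Dict.empty).get? label)
        _ hnd (fun x _ => PySem.Dict.contains_empty _)]
  congr 1
  apply List.filterMap_congr
  intro label hlabel
  rw [hitsGet _ _ _ _
        (wanted_sound _ _ (fun x lab hx => by rw [PySem.Dict.get?_empty] at hx; cases hx))
        (wanted_complete _ _ _ hlabel)]
  rcases h : (PySem.Dict.ofList bl).items.reverse.find? (fun p => p.2 == ("Special: " ++ label)) with _ | p
  · simp [h, PySem.Dict.get?_empty]
  · simp [h]
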